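-- pv_equiv track=rewrite | github.com/vitorozman/chemistry-journals-rss | app_texas_researchers.py | group_by_institution
-- ===== SOURCE A (Python) =====
-- from collections import defaultdict
--
-- def group_by_institution(candidates: list[dict]) -> dict[str, list[dict]]:
--     """Group researchers by primary_institution, alphabetically sorted."""
--     groups: dict[str, list] = defaultdict(list)
--     for r in candidates:
--         inst = r.get("primary_institution") or "Unknown Institution"
--         groups[inst].append(r)
--     for inst in groups:
--         groups[inst].sort(key=lambda r: (r.get("last_name", "").lower(),
--                                          r.get("first_name", "").lower()))
--     return dict(sorted(groups.items()))
-- ===== SOURCE B (Python) =====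
-- def group_by_institution(candidates: list[dict]) -> dict[str, list[dict]]:
--     """Group researchers by primary_institution, alphabetically sorted.
--
--     No grouping dict: compute the sorted distinct institutions, then build
--     each group by filtering the candidates for that institution and sorting
--     it by (last, first) name.
--     """
--     def inst(r):
--         return r.get("primary_institution") or "Unknown Institution"
--
--     insts = sorted({inst(r) for r in candidates})
--     return {i: sorted((r for r in candidates if inst(r) == i),
--                       key=lambda r: (r.get("last_name", "").lower(),
--                                      r.get("first_name", "").lower()))
--             for i in insts}
-- ===== Notes on version B (the rewrite author's own statement) =====
-- stated objective: alternative
-- what changed: A builds a defaultdict in one grouping pass, then sorts each group and finally sorts the keys; B never builds a grouping dict: it computes the sorted set of distinct institutions and constructs each group directly by filtering the candidate list per institution and sorting it by name.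
import Mathlib
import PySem

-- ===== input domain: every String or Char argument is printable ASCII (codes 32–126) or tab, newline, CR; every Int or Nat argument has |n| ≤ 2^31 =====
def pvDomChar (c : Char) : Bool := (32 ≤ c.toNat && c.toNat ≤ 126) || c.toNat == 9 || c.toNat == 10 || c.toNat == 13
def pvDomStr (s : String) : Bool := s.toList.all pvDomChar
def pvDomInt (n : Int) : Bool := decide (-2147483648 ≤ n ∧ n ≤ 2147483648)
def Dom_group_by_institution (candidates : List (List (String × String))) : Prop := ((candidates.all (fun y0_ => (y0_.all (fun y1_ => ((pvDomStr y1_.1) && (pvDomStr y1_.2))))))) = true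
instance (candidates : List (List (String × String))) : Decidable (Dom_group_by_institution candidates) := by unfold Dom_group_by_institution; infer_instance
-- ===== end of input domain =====

-- ===== PORT A =====
-- B builds no grouping dict: it takes the sorted distinct institutions and constructs each
-- group by filtering the candidate list per institution; same return value as A.

-- inst = r.get("primary_institution") or "Unknown Institution"  (None or "" falls back)
def pvInst (r : List (String × String)) : String :=
  match (PySem.Dict.mk r).get? "primary_institution" with
  | some s => if s = "" then "Unknown Institution" else s
  | none => "Unknown Institution"

-- r.get("last_name", "").lower()
def pvLast (r : List (String × String)) : String :=
  PySem.Str.lower ((PySem.Dict.mk r).getD "last_name" "")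

-- r.get("first_name", "").lower()
def pvFirst (r : List (String × String)) : String :=
  PySem.Str.lower ((PySem.Dict.mk r).getD "first_name" "")

def group_by_institution (candidates : List (List (String × String))) : List (String × List (List (String × String))) :=
  -- groups[inst].append(r) on a defaultdict(list)
  let groups := candidates.foldl (fun d r => d.modify (pvInst r) [] (· ++ [r])) PySem.Dict.empty
  -- for inst in groups: groups[inst].sort(key=...)  (in-place, key order unchanged)
  let sortedGroups := groups.items.map (fun p => (p.1, PySem.List.sorted2 p.2 pvLast pvFirst))
  -- dict(sorted(groups.items())): the keys are distinct strings, so Python's tuple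
  -- comparison is decided by the key alone; ported keyed on the first component
  PySem.List.sorted sortedGroups (fun p => p.1)

-- ===== PORT B =====
def group_by_institution_alt (candidates : List (List (String × String))) : List (String × List (List (String × String))) :=
  -- insts = sorted({inst(r) for r in candidates})
  let insts := PySem.List.sorted (PySem.Set.ofList (candidates.map pvInst)) (fun k => k)
  -- {i: sorted((r for r in candidates if inst(r) == i), key=name) for i in insts}
  insts.map (fun i => (i, PySem.List.sorted2 (candidates.filter (fun r => pvInst r == i)) pvLast pvFirst))

-- ===== PRECONDITION & SPEC =====
def Spec_group_by_institution (candidates : List (List (String × String))) (out : List (String × List (List (String × String)))) : Prop := out = group_by_institution_alt candidates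
instance (candidates : List (List (String × String))) (out : List (String × List (List (String × String)))) : Decidable (Spec_group_by_institution candidates out) := by unfold Spec_group_by_institution; infer_instance

-- ===== CLAIM (what is proved, stated in full; the proofs are below) =====
def Claim_equal_group_by_institution : Prop := ∀ (candidates : List (List (String × String))), Dom_group_by_institution candidates → Spec_group_by_institution candidates (group_by_institution candidates)

-- ===== LEMMAS AND PROOFS =====

lemma grp_getD (l : List (List (String × String))) (c : String) :
    ((l.foldl (fun d r => d.modify (pvInst r) [] (· ++ [r])) PySem.Dict.empty).getD c []) =
      l.filter (fun r => pvInst r == c) := by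
  have e : l.foldl (fun d r => d.modify (pvInst r) [] (· ++ [r])) PySem.Dict.empty
      = (l.map (fun r => (pvInst r, r))).foldl (fun d p => d.modify p.1 [] (· ++ [p.2])) PySem.Dict.empty := by
    rw [List.foldl_map]
  rw [e, PySem.Dict.getD_foldl_modify_append]
  simp [List.filter_map, Function.comp_def, List.map_map]

lemma grp_items (l : List (List (String × String))) :
    (l.foldl (fun d r => d.modify (pvInst r) [] (· ++ [r])) PySem.Dict.empty).items =
      (PySem.Set.ofList (l.map pvInst)).map (fun k => (k, l.filter (fun r => pvInst r == k))) := by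
  have hnd : (l.foldl (fun d r => d.modify (pvInst r) [] (· ++ [r])) PySem.Dict.empty).keys.Nodup := by
    apply PySem.Dict.nodup_keys_foldl_modify_key l pvInst [] (fun _ r g => g ++ [r])
    simp [PySem.Dict.keys_empty]
  rw [PySem.Dict.items_eq_map_keys _ hnd []]
  rw [PySem.Dict.keys_foldl_modify_key l pvInst [] (fun _ r g => g ++ [r])]
  rw [PySem.Dict.keys_empty, PySem.Set.update_nil_left]
  exact List.map_congr_left (fun k _ => by rw [grp_getD])

-- ===== VERDICT (by name: the statement is the Claim_ definition above) =====
theorem group_by_institution_spec : Claim_equal_group_by_institution := by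
  intro candidates _
  unfold Spec_group_by_institution
  simp only [group_by_institution, group_by_institution_alt]
  rw [grp_items candidates, List.map_map]
  have hcomp : ((fun p : String × List (List (String × String)) =>
        (p.1, PySem.List.sorted2 p.2 pvLast pvFirst)) ∘
        (fun k => (k, candidates.filter (fun r => pvInst r == k)))) =
      fun k => (k, PySem.List.sorted2 (candidates.filter (fun r => pvInst r == k)) pvLast pvFirst) := rfl
  rw [hcomp]
  -- sorting the pairs on the (distinct) first component = mapping over the sorted key set
  have hperm : ((PySem.List.sorted (PySem.Set.ofList (candidates.map pvInst)) (fun k => k)).map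
      (fun k => (k, PySem.List.sorted2 (candidates.filter (fun r => pvInst r == k)) pvLast pvFirst))).Perm
      ((PySem.Set.ofList (candidates.map pvInst)).map
      (fun k => (k, PySem.List.sorted2 (candidates.filter (fun r => pvInst r == k)) pvLast pvFirst))) :=
    (PySem.List.sorted_perm _ _ _).map _
  have hpw : (((PySem.List.sorted (PySem.Set.ofList (candidates.map pvInst)) (fun k => k)).map
      (fun k => (k, PySem.List.sorted2 (candidates.filter (fun r => pvInst r == k)) pvLast pvFirst))).Pairwise
      (fun a b => a.1 < b.1)) := by
    rw [List.pairwise_map]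
    exact PySem.List.sorted_ofList_pairwise_lt _
  exact (PySem.List.sorted_eq_of_perm_of_pairwise_lt _ _ _ hperm hpw).symm ▸ rfl
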